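-- pv_equiv track=rewrite | github.com/bizhanchik/RichardOps | backend/services/alerts.py | should_send_email
-- ===== SOURCE A (Python) =====
-- from typing import List
--
-- CRITICAL_ALERTS = [
--     "CPU_SPIKE",
--     "BRUTE_FORCE",
--     "SHELL_IN_CONTAINER"
-- ]
--
-- def should_send_email(alerts: List[str]) -> bool:
--     """
--     Determine if an email alert should be sent based on the list of alerts.
--
--     This function checks if any of the provided alerts match the critical alert types.
--     For BRUTE_FORCE alerts, it performs a prefix match to handle IP-specific alerts
--     like "BRUTE_FORCE:192.168.1.100".
--
--     Args:
--         alerts: List of alert strings from the monitoring payload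
--
--     Returns:
--         True if any alert matches critical alert criteria, False otherwise
--     """
--     if not alerts:
--         return False
--
--     for alert in alerts:
--         # Check for exact matches first
--         if alert in CRITICAL_ALERTS:
--             return True
--
--         # Check for prefix matches (e.g., "BRUTE_FORCE:IP" matches "BRUTE_FORCE")
--         for critical_alert in CRITICAL_ALERTS:
--             if alert.startswith(f"{critical_alert}:"):
--                 return True
--
--     return False
-- ===== SOURCE B (Python) =====
-- CRITICAL = {"CPU_SPIKE", "BRUTE_FORCE", "SHELL_IN_CONTAINER"}
--
-- def should_send_email(alerts):
--     if not alerts: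
--         return False
--     # staged: first build the set of normalized keys (segment before the first
--     # colon), then one disjointness test against the critical set
--     keys = {a.split(':', 1)[0] for a in alerts}
--     return not CRITICAL.isdisjoint(keys)
-- ===== Notes on version B (the rewrite author's own statement) =====
-- stated objective: alternative
-- what changed: Replaces A's nested early-return scan (exact match plus an inner startswith loop per alert) with staged passes: build the set of each alert's pre-colon key once, then a single set-disjointness test against the critical set.
import Mathlib
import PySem

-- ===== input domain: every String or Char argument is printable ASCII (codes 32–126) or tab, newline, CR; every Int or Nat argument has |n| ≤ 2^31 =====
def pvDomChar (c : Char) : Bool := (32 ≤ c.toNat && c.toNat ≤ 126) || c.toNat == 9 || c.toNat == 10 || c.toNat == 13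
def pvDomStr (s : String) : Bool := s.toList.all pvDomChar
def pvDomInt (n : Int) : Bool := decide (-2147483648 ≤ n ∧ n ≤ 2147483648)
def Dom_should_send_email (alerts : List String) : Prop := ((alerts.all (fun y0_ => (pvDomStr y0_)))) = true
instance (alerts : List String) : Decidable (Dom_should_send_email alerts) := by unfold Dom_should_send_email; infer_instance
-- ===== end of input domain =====

-- B replaces A's nested early-return scan with staged passes: build the set of each
-- alert's pre-colon key once, then one set-disjointness test (objective: alternative).

-- ===== PORT A =====
def CRITICAL_ALERTS : List String := ["CPU_SPIKE", "BRUTE_FORCE", "SHELL_IN_CONTAINER"]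

-- the `for alert in alerts` loop with its early returns
def pvALoop : List String → Bool
  | [] => false
  | alert :: rest =>
      if CRITICAL_ALERTS.contains alert then true
      else if CRITICAL_ALERTS.any (fun c => PySem.Str.startswith alert (c ++ ":")) then true
      else pvALoop rest

def should_send_email (alerts : List String) : Bool :=
  if alerts = [] then false else pvALoop alerts

-- ===== PORT B =====
def CRITICAL : PySem.Set String := PySem.Set.ofList ["CPU_SPIKE", "BRUTE_FORCE", "SHELL_IN_CONTAINER"]

-- Source B's pre-colon key of one alert: a.split(':', 1)[0]
def pvKey (a : String) : String := ((PySem.Str.splitMax? a ":" 1).getD []).headD ""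

def should_send_email_alt (alerts : List String) : Bool :=
  if alerts = [] then false
  else
    -- keys = {a.split(':', 1)[0] for a in alerts}
    let keys : PySem.Set String := PySem.Set.ofList (alerts.map pvKey)
    -- not CRITICAL.isdisjoint(keys)
    !(PySem.Set.isdisjoint CRITICAL keys)

-- ===== PRECONDITION & SPEC =====
def Spec_should_send_email (alerts : List String) (out : Bool) : Prop := out = should_send_email_alt alerts
instance (alerts : List String) (out : Bool) : Decidable (Spec_should_send_email alerts out) := by unfold Spec_should_send_email; infer_instance

-- ===== CLAIM (what is proved, stated in full; the proofs are below) =====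
def Claim_equal_should_send_email : Prop := ∀ (alerts : List String), Dom_should_send_email alerts → Spec_should_send_email alerts (should_send_email alerts)

-- ===== LEMMAS AND PROOFS =====

-- with maxsplit exhausted (m = 0), go flushes the whole remainder as one piece
theorem pv_go_zero (sep : List Char) (fuel : Nat) (l cur : List Char) (acc : List (List Char)) :
    PySem.Chars.splitOnMax.go sep fuel 0 l cur acc = ((cur.reverse ++ l) :: acc).reverse := by
  cases fuel with
  | zero => rfl
  | succ f => cases l with
    | nil => simp [PySem.Chars.splitOnMax.go]
    | cons c rest => simp [PySem.Chars.splitOnMax.go]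

-- the first piece of split(':', 1) is the maximal colon-free prefix
theorem pv_go_one_head (fuel : Nat) : ∀ (l cur : List Char), l.length < fuel →
    (PySem.Chars.splitOnMax.go [':'] fuel 1 l cur []).head? =
      some (cur.reverse ++ l.takeWhile (fun ch => ch ≠ ':')) := by
  induction fuel with
  | zero => intro l cur h; omega
  | succ f ih =>
    intro l cur h
    cases l with
    | nil => simp [PySem.Chars.splitOnMax.go]
    | cons c rest =>
      by_cases hc : c = ':'
      · subst hc
        simp [PySem.Chars.splitOnMax.go, List.isPrefixOf, pv_go_zero, List.takeWhile]
      · have hpre : (List.isPrefixOf [':'] (c :: rest)) = false := by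
          simp [List.isPrefixOf]; exact fun h => absurd h.symm hc
        simp only [PySem.Chars.splitOnMax.go, hpre, List.length_cons] at *
        rw [if_neg (by omega), if_neg (by simp)]
        rw [ih rest (c :: cur) (by omega)]
        simp [List.takeWhile, hc]

theorem pv_firstSeg (a : String) :
    pvKey a = String.ofList (a.toList.takeWhile (fun ch => ch ≠ ':')) := by
  simp only [pvKey, PySem.Str.splitMax?, PySem.Chars.splitMax?]
  have hsep : (":".toList.isEmpty) = false := by decide
  rw [hsep]
  simp only [Bool.false_eq_true, if_false, Option.map_some, Option.getD_some,
    PySem.Chars.splitOnMax]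
  rw [if_neg (by decide)]
  have h := pv_go_one_head (a.toList.length + 1) a.toList [] (by omega)
  have h1 : (Int.toNat 1) = 1 := rfl
  have h2 : (":".toList) = [':'] := rfl
  rw [h1, h2]
  rcases hg : PySem.Chars.splitOnMax.go [':'] (a.toList.length + 1) 1 a.toList [] [] with _ | ⟨x, xs⟩
  · rw [hg] at h; simp at h
  · rw [hg] at h
    simp only [List.head?_cons, Option.some_inj] at h
    simp [h]

-- a colon-free string c: first colon-free prefix of s equals c iff s = c or s starts with "c:"
theorem pv_key (c : List Char) (hc : (':' : Char) ∉ c) (s : List Char) :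
    (s.takeWhile (fun ch => ch ≠ ':') = c) ↔ (s = c ∨ (c ++ [':']) <+: s) := by
  constructor
  · intro h
    rcases hd : s.dropWhile (fun ch => ch ≠ ':') with _ | ⟨x, xs⟩
    · left
      have := List.takeWhile_append_dropWhile (p := fun ch => ch ≠ ':') (l := s)
      rw [h, hd] at this; simpa using this.symm
    · right
      have hx := List.head?_dropWhile_not (fun ch => ch ≠ ':') s
      rw [hd] at hx; simp at hx
      have := List.takeWhile_append_dropWhile (p := fun ch => ch ≠ ':') (l := s)
      rw [h, hd, hx] at this
      exact ⟨xs, by simpa using this⟩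
  · intro h
    rcases h with h | ⟨t, ht⟩
    · subst h
      refine List.takeWhile_eq_self_iff.mpr ?_
      intro x hx
      simp only [ne_eq, decide_eq_true_eq]
      rintro rfl
      exact hc hx
    · subst ht
      rw [List.append_assoc, List.takeWhile_append_of_pos ?_]
      · simp
      · intro x hx
        simp only [ne_eq, decide_eq_true_eq]
        rintro rfl
        exact hc hx

theorem pv_startswith_cons (a c : String) :
    PySem.Str.startswith a (c ++ ":") = true ↔ (c.toList ++ [':']) <+: a.toList := by
  rw [PySem.Str.startswith_eq, PySem.Chars.startswith_iff]
  simp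

-- the two membership tests agree on every single alert
theorem pv_key_iff (a : String) :
    (String.ofList (a.toList.takeWhile (fun ch => ch ≠ ':')) ∈
        (["CPU_SPIKE", "BRUTE_FORCE", "SHELL_IN_CONTAINER"] : List String)) ↔
      (a ∈ CRITICAL_ALERTS ∨ ∃ c ∈ CRITICAL_ALERTS, PySem.Str.startswith a (c ++ ":") = true) := by
  have conv1 : ∀ c : String, (':' : Char) ∉ c.toList →
      ((String.ofList (a.toList.takeWhile (fun ch => ch ≠ ':')) = c) ↔
        (a = c ∨ (c.toList ++ [':']) <+: a.toList)) := by
    intro c hcol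
    constructor
    · intro he
      have htl : a.toList.takeWhile (fun ch => ch ≠ ':') = c.toList := by
        have := congrArg String.toList he; simpa using this
      rcases (pv_key c.toList hcol a.toList).mp htl with h | h
      · left; exact String.toList_injective (by simpa using h)
      · right; exact h
    · intro hd
      have htl : a.toList.takeWhile (fun ch => ch ≠ ':') = c.toList :=
        (pv_key c.toList hcol a.toList).mpr
          (hd.imp (fun h => by rw [h]) (fun h => h))
      rw [htl]; simp
  have m1 := conv1 "CPU_SPIKE" (by decide)
  have m2 := conv1 "BRUTE_FORCE" (by decide)
  have m3 := conv1 "SHELL_IN_CONTAINER" (by decide)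
  constructor
  · intro hb
    simp only [List.mem_cons, List.not_mem_nil, or_false] at hb
    rcases hb with h | h | h
    · rcases m1.mp h with h' | h'
      · exact Or.inl (by rw [h']; decide)
      · exact Or.inr ⟨"CPU_SPIKE", by decide, (pv_startswith_cons a _).mpr h'⟩
    · rcases m2.mp h with h' | h'
      · exact Or.inl (by rw [h']; decide)
      · exact Or.inr ⟨"BRUTE_FORCE", by decide, (pv_startswith_cons a _).mpr h'⟩
    · rcases m3.mp h with h' | h'
      · exact Or.inl (by rw [h']; decide)
      · exact Or.inr ⟨"SHELL_IN_CONTAINER", by decide, (pv_startswith_cons a _).mpr h'⟩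
  · intro ha
    simp only [List.mem_cons, List.not_mem_nil, or_false]
    rcases ha with h | ⟨c, hc, hsw⟩
    · simp only [CRITICAL_ALERTS, List.mem_cons, List.not_mem_nil, or_false] at h
      rcases h with rfl | rfl | rfl
      · exact Or.inl (m1.mpr (Or.inl rfl))
      · exact Or.inr (Or.inl (m2.mpr (Or.inl rfl)))
      · exact Or.inr (Or.inr (m3.mpr (Or.inl rfl)))
    · have hp := (pv_startswith_cons a c).mp hsw
      simp only [CRITICAL_ALERTS, List.mem_cons, List.not_mem_nil, or_false] at hc
      rcases hc with rfl | rfl | rfl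
      · exact Or.inl (m1.mpr (Or.inr hp))
      · exact Or.inr (Or.inl (m2.mpr (Or.inr hp)))
      · exact Or.inr (Or.inr (m3.mpr (Or.inr hp)))

-- A's per-alert test, as a key membership
theorem pv_elem_iff (a : String) :
    ((if CRITICAL_ALERTS.contains a then true
      else if CRITICAL_ALERTS.any (fun c => PySem.Str.startswith a (c ++ ":")) then true
      else false) = true) ↔ pvKey a ∈ CRITICAL := by
  have hset : (CRITICAL : List String) = ["CPU_SPIKE", "BRUTE_FORCE", "SHELL_IN_CONTAINER"] := by decide
  rw [pv_firstSeg, hset, pv_key_iff a]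
  constructor
  · intro h
    split_ifs at h with h1 h2
    · exact Or.inl (by simpa using h1)
    · exact Or.inr (by simpa [List.any_eq_true] using h2)
  · intro h
    rcases h with h | h
    · rw [if_pos (by simpa using h)]
    · by_cases h1 : CRITICAL_ALERTS.contains a = true
      · rw [if_pos h1]
      · rw [if_neg h1, if_pos (by simpa [List.any_eq_true] using h)]

-- A's loop returns true iff some alert's key lies in the critical set
theorem pv_aLoop_iff (alerts : List String) :
    pvALoop alerts = true ↔ ∃ a ∈ alerts, pvKey a ∈ CRITICAL := by
  induction alerts with
  | nil => simp [pvALoop]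
  | cons a rest ih =>
    rw [pvALoop]
    constructor
    · intro h
      split_ifs at h with h1 h2
      · exact ⟨a, by simp, (pv_elem_iff a).mp (by rw [if_pos h1])⟩
      · exact ⟨a, by simp, (pv_elem_iff a).mp (by rw [if_neg h1, if_pos h2])⟩
      · rcases ih.mp h with ⟨x, hx, hk⟩
        exact ⟨x, by simp [hx], hk⟩
    · rintro ⟨x, hx, hk⟩
      by_cases h1 : CRITICAL_ALERTS.contains a = true
      · rw [if_pos h1]
      · by_cases h2 : CRITICAL_ALERTS.any (fun c => PySem.Str.startswith a (c ++ ":")) = true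
        · rw [if_neg h1, if_pos h2]
        · rw [if_neg h1, if_neg h2]
          rcases List.mem_cons.mp hx with rfl | hx'
          · exfalso
            have hz := (pv_elem_iff x).mpr hk
            rw [if_neg h1, if_neg h2] at hz
            exact Bool.false_ne_true hz
          · exact ih.mpr ⟨x, hx', hk⟩

-- B's staged computation: the sets are non-disjoint iff some alert's key is critical
theorem pv_disjoint_iff (alerts : List String) :
    PySem.Set.isdisjoint CRITICAL (PySem.Set.ofList (alerts.map pvKey)) = false ↔
      ∃ a ∈ alerts, pvKey a ∈ CRITICAL := by
  constructor
  · intro hd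
    by_contra hno
    push Not at hno
    have ht : PySem.Set.isdisjoint CRITICAL (PySem.Set.ofList (alerts.map pvKey)) = true := by
      refine (PySem.Set.isdisjoint_iff _ _).mpr ?_
      intro x hx hm
      rcases List.mem_map.mp ((PySem.Set.mem_ofList _ _).mp hm) with ⟨a, ha, rfl⟩
      exact hno a ha hx
    rw [ht] at hd
    exact absurd hd (by simp)
  · rintro ⟨a, ha, hk⟩
    cases hci : PySem.Set.isdisjoint CRITICAL (PySem.Set.ofList (alerts.map pvKey)) with
    | false => rfl
    | true =>
      exact absurd ((PySem.Set.isdisjoint_iff _ _).mp hci (pvKey a) hk)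
        (by simp [(PySem.Set.mem_ofList _ _).mpr (List.mem_map.mpr ⟨a, ha, rfl⟩)])

-- ===== VERDICT (by name: the statement is the Claim_ definition above) =====
theorem should_send_email_spec : Claim_equal_should_send_email := by
  intro alerts _
  unfold Spec_should_send_email should_send_email should_send_email_alt
  by_cases h : alerts = []
  · simp [h]
  · rw [if_neg h, if_neg h]
    show pvALoop alerts = !(PySem.Set.isdisjoint CRITICAL (PySem.Set.ofList (alerts.map pvKey)))
    refine Bool.eq_iff_iff.mpr ?_
    rw [Bool.not_eq_true']
    exact (pv_aLoop_iff alerts).trans (pv_disjoint_iff alerts).symm
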